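-- pv_equiv track=rewrite | github.com/FormalOtaku/primitive_fitting | scripts/runbook_runner.py | _strip_run_marker
-- ===== SOURCE A (Python) =====
-- from typing import List, Optional, Tuple
--
-- def _strip_run_marker(block: List[str]) -> List[str]:
--     stripped = []
--     removed = False
--     for line in block:
--         if not removed and line.strip() == "# RUN":
--             removed = True
--             continue
--         stripped.append(line)
--     return stripped
-- ===== SOURCE B (Python) =====
-- from typing import List
--
-- def _strip_run_marker(block: List[str]) -> List[str]:
--     for i, line in enumerate(block):
--         if line.strip() == "# RUN":
--             return block[:i] + block[i + 1:]
--     return list(block)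
-- ===== Notes on version B (the rewrite author's own statement) =====
-- stated objective: simpler
-- what changed: Replaces the removed-flag loop with per-element appends by locate-the-first-marker (enumerate + early return) and one slice-splice block[:i] + block[i+1:], copying the unmatched case wholesale with list(block).
import Mathlib
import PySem

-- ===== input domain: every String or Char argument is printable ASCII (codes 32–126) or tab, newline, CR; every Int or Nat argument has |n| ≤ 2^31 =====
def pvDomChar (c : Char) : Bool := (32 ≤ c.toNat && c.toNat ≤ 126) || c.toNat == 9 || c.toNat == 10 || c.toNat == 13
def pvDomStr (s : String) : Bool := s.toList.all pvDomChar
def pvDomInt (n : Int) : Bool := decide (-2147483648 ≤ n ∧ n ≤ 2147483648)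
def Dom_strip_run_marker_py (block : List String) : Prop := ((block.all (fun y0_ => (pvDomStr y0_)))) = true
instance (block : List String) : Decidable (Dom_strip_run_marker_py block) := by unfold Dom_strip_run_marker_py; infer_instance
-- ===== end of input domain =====

-- B replaces A's removed-flag loop with one-pass appends by locate-first-marker then slice-splice (simpler decomposition).


-- ===== PORT A =====
-- the loop over `block` with the (stripped, removed) state; `stripped` is the result built by appends
def stripRunMarkerGo (removed : Bool) : List String → List String
  | [] => []
  | line :: rest =>
      if !removed && (PySem.Str.strip line == "# RUN") then
        stripRunMarkerGo true rest
      else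
        line :: stripRunMarkerGo removed rest

def strip_run_marker_py (block : List String) : List String :=
  stripRunMarkerGo false block

-- ===== PORT B =====
-- enumerate-and-return-on-first-hit = List.findIdx?; block[:i] / block[i+1:] = PySem.List.slice
def strip_run_marker_py_alt (block : List String) : List String :=
  match block.findIdx? (fun line => PySem.Str.strip line == "# RUN") with
  | some i =>
      PySem.List.slice block none (some (i : Int))
        ++ PySem.List.slice block (some ((i : Int) + 1)) none
  | none => block

-- ===== PRECONDITION & SPEC =====
def Spec_strip_run_marker_py (block : List String) (out : List String) : Prop := out = strip_run_marker_py_alt block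
instance (block : List String) (out : List String) : Decidable (Spec_strip_run_marker_py block out) := by unfold Spec_strip_run_marker_py; infer_instance

-- ===== CLAIM (what is proved, stated in full; the proofs are below) =====
def Claim_equal_strip_run_marker_py : Prop := ∀ (block : List String), Dom_strip_run_marker_py block → Spec_strip_run_marker_py block (strip_run_marker_py block)

-- ===== LEMMAS AND PROOFS =====

-- once the marker has been removed, the loop keeps every remaining line
theorem stripRunMarkerGo_true (ls : List String) : stripRunMarkerGo true ls = ls := by
  induction ls with
  | nil => rfl
  | cons l ls ih => simp [stripRunMarkerGo, ih]

theorem stripRunMarker_eq (block : List String) :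
    stripRunMarkerGo false block = strip_run_marker_py_alt block := by
  induction block with
  | nil => rfl
  | cons l ls ih =>
    by_cases h : PySem.Str.strip l == "# RUN"
    · have h0 : PySem.List.slice (l :: ls) none (some 0) = ([] : List String) := by
        rw [PySem.List.slice_to _ (le_refl 0)]; rfl
      simp [stripRunMarkerGo, h, strip_run_marker_py_alt, List.findIdx?_cons,
        stripRunMarkerGo_true, PySem.List.slice_from_one, h0]
    · simp only [stripRunMarkerGo, h, Bool.not_false, ih,
        strip_run_marker_py_alt, List.findIdx?_cons, Bool.and_false, if_neg,
        Bool.false_eq_true, not_false_iff]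
      cases hfi : ls.findIdx? (fun line => PySem.Str.strip line == "# RUN") with
      | none => simp
      | some i =>
        simp only [Option.map_some]
        have h1 : ((i : Int) + 1) = ((i + 1 : Nat) : Int) := by push_cast; ring
        have h2 : (((i + 1 : Nat) : Int) + 1) = ((i + 2 : Nat) : Int) := by push_cast; ring
        rw [h1, h2, PySem.List.slice_to_natCast, PySem.List.slice_to_natCast,
          PySem.List.slice_from_natCast, PySem.List.slice_from_natCast]
        simp

-- ===== VERDICT (by name: the statement is the Claim_ definition above) =====
theorem strip_run_marker_py_spec : Claim_equal_strip_run_marker_py := by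
  intro block _
  unfold Spec_strip_run_marker_py strip_run_marker_py
  exact stripRunMarker_eq block
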